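-- pv_equiv track=rewrite | github.com/bathcat/pyOiler | src/pyoiler/problems/euler178a.py | is_step_number
-- ===== SOURCE A (Python) =====
-- def is_step_number(n: int) -> bool:
--     if n < 10:
--         return False
--     ones_place = n % 10
--     truncated = n // 10
--     tens_place = truncated % 10
--     if abs(ones_place - tens_place) != 1:
--         return False
--     if truncated < 10:
--         return True
--     return is_step_number(truncated)
-- ===== SOURCE B (Python) =====
-- def is_step_number(n: int) -> bool:
--     if n < 10:
--         return False
--     digits = []
--     while n > 0:
--         digits.append(n % 10)
--         n //= 10
--     return all(abs(a - b) == 1 for a, b in zip(digits, digits[1:]))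
-- ===== Notes on version B (the rewrite author's own statement) =====
-- stated objective: alternative
-- what changed: Replaces A's recursion that interleaves digit peeling with the adjacency check by an iterative loop that collects all base-10 digits into a list once, followed by a separate pairwise all() over zipped adjacent digits.
import Mathlib
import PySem

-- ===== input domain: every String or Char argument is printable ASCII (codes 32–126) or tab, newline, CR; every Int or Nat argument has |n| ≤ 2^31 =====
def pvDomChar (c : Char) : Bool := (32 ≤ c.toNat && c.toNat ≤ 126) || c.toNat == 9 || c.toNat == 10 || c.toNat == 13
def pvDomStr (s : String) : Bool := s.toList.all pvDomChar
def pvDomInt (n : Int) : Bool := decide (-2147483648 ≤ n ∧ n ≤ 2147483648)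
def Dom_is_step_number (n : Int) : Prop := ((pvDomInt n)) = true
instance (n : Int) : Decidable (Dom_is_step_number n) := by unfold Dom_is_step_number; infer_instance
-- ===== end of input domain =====

-- B replaces A's recursion (check interleaved with digit peeling) by one loop collecting the
-- digit list and a separate pairwise scan; same cost, different decomposition (objective: alternative).

-- ===== PORT A =====
-- helper for termination of the recursive port
theorem pv_trunc_lt (n : Int) (h : 0 < n) : (PySem.Int.floordiv n 10).toNat < n.toNat := by
  simp only [PySem.Int.floordiv, Int.fdiv_eq_ediv]
  omega

def is_step_number (n : Int) : Bool :=
  if n < 10 then false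
  else
    let ones_place := PySem.Int.mod n 10
    let truncated := PySem.Int.floordiv n 10
    let tens_place := PySem.Int.mod truncated 10
    if |ones_place - tens_place| ≠ 1 then false
    else if truncated < 10 then true
    else is_step_number truncated
termination_by n.toNat
decreasing_by exact pv_trunc_lt n (by omega)

-- ===== PORT B =====
-- the while-loop of Source B: collect digits, least-significant first
def pvDigits (n : Int) : List Int :=
  if n > 0 then PySem.Int.mod n 10 :: pvDigits (PySem.Int.floordiv n 10) else []
termination_by n.toNat
decreasing_by exact pv_trunc_lt n (by omega)

-- all(abs(a-b) == 1 for a, b in zip(digits, digits[1:]))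
def pvPairwiseStep (l : List Int) : Bool :=
  (l.zip l.tail).all (fun p => |p.1 - p.2| == 1)

def is_step_number_alt (n : Int) : Bool :=
  if n < 10 then false
  else pvPairwiseStep (pvDigits n)

-- ===== PRECONDITION & SPEC =====
def Spec_is_step_number (n : Int) (out : Bool) : Prop := out = is_step_number_alt n
instance (n : Int) (out : Bool) : Decidable (Spec_is_step_number n out) := by unfold Spec_is_step_number; infer_instance

-- ===== CLAIM (what is proved, stated in full; the proofs are below) =====
def Claim_equal_is_step_number : Prop := ∀ (n : Int), Dom_is_step_number n → Spec_is_step_number n (is_step_number n)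

-- ===== LEMMAS AND PROOFS =====
theorem pv_fd (n : Int) : PySem.Int.floordiv n 10 = n / 10 := by
  simp [PySem.Int.floordiv, Int.fdiv_eq_ediv]

theorem pv_fm (n : Int) : PySem.Int.mod n 10 = n % 10 := by
  simp [PySem.Int.mod, Int.fmod_eq_emod]

theorem pvDigits_pos {n : Int} (h : 0 < n) : pvDigits n = n % 10 :: pvDigits (n / 10) := by
  rw [pvDigits]
  simp [h]

theorem pvDigits_zero : pvDigits 0 = [] := by
  rw [pvDigits]; simp

theorem pvPairwiseStep_cons2 (a b : Int) (l : List Int) :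
    pvPairwiseStep (a :: b :: l) = ((|a - b| == 1) && pvPairwiseStep (b :: l)) := by
  simp [pvPairwiseStep]

theorem pv_main (n : Int) (h : 10 ≤ n) : is_step_number n = pvPairwiseStep (pvDigits n) := by
  have h0 : ¬ n < 10 := by omega
  have ht : 0 < n / 10 := by omega
  rw [is_step_number]
  simp only [h0, if_false, pv_fd, pv_fm]
  rw [pvDigits_pos (by omega : (0:Int) < n), pvDigits_pos ht, pvPairwiseStep_cons2]
  by_cases habs : |n % 10 - n / 10 % 10| = 1
  · by_cases hsm : n / 10 < 10
    · have h1 : n / 10 % 10 = n / 10 := by omega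
      have h2 : n / 10 / 10 = 0 := by omega
      rw [h1] at habs
      simp [hsm, h1, h2, pvDigits_zero, pvPairwiseStep, habs]
    · have hrec := pv_main (n / 10) (by omega)
      rw [pvDigits_pos ht] at hrec
      simp [habs, hsm, hrec]
  · simp [habs]
termination_by n.toNat
decreasing_by omega

-- ===== VERDICT (by name: the statement is the Claim_ definition above) =====
theorem is_step_number_spec : Claim_equal_is_step_number := by
  intro n _
  unfold Spec_is_step_number is_step_number_alt
  by_cases h : n < 10
  · rw [is_step_number]; simp [h]
  · simp only [h, if_false]
    exact pv_main n (by omega)
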